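-- pv_equiv track=rewrite | github.com/LeeJuhae/Algorithm_study | baekjoon/14671.py | solution
-- ===== SOURCE A (Python) =====
-- def solution(room, molds):
--     tile = [[e+1, n+1] for e in range(room[0]) for n in range(room[1])]
--     for i,mold in enumerate(molds):
--         if mold in tile:
--             tile.pop(tile.index(mold))
--         if i != 0:
--             if [molds[i-1][0]+1,molds[i-1][1]+1] in tile:
--                 tile.pop(tile.index([molds[i-1][0]+1,molds[i-1][1]+1]))
--             if [molds[i-1][0]+1,molds[i-1][1]-1] in tile:
--                 tile.pop(tile.index([molds[i-1][0]+1,molds[i-1][1]-1]))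
--             if [molds[i-1][0]-1,molds[i-1][1]+1] in tile:
--                 tile.pop(tile.index([molds[i-1][0]-1,molds[i-1][1]+1]))
--             if [molds[i-1][0]-1,molds[i-1][1]-1] in tile:
--                 tile.pop(tile.index([molds[i-1][0]-1,molds[i-1][1]-1]))
--     return "yes" if len(tile) == 0 else "no"
-- ===== SOURCE B (Python) =====
-- def solution(room, molds):
--     covered = {tuple(m) for m in molds}
--     for m in molds[:-1]:
--         x, y = m[0], m[1]
--         covered.update(((x + 1, y + 1), (x + 1, y - 1), (x - 1, y + 1), (x - 1, y - 1)))
--     cells = {(e + 1, n + 1) for e in range(room[0]) for n in range(room[1])}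
--     return "yes" if cells <= covered else "no"
-- ===== Notes on version B (the rewrite author's own statement) =====
-- stated objective: faster
-- what changed: B builds once the set of covered cells (every mold plus the four diagonal neighbours of every mold except the last) and answers by a subset test of the grid against it, instead of A's materialising all grid cells as a list and deleting them one by one with linear in/index/pop scans.
import Mathlib
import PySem

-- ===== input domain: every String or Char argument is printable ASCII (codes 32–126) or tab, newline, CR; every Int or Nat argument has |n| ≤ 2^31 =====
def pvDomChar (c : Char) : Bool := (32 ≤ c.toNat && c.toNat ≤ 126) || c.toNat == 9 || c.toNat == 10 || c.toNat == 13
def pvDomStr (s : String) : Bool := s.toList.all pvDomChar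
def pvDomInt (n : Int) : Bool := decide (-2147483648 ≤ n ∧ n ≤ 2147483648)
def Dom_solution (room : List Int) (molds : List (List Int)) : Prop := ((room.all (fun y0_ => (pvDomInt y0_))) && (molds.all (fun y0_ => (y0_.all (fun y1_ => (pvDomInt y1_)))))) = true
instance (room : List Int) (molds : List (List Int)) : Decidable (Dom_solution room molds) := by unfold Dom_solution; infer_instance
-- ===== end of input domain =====

-- B builds the set of covered cells once and tests the grid for subset-ness, replacing A's
-- grid list with repeated linear in/index/pop scans (measured faster in a timing run).


-- ===== PORT A =====
-- 'if c in tile: tile.pop(tile.index(c))'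
def pvPopIf (tile : List (List Int)) (c : List Int) : List (List Int) :=
  if c ∈ tile then
    match PySem.List.index? tile c with
    | some j => ((PySem.List.pop? tile (j : Int)).map Prod.snd).getD tile
    | none => tile
  else tile

-- one iteration of A's loop over enumerate(molds)
def pvStepA (molds : List (List Int)) (tile : List (List Int)) (p : Int × List Int) : List (List Int) :=
  let tile1 := pvPopIf tile p.2
  if p.1 ≠ 0 then
    -- molds[i-1][0] / molds[i-1][1]; the .getD defaults are never reached under Pre_solution
    let prev := (PySem.List.pyGet? molds (p.1 - 1)).getD []
    let p0 := (PySem.List.pyGet? prev 0).getD 0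
    let p1 := (PySem.List.pyGet? prev 1).getD 0
    pvPopIf (pvPopIf (pvPopIf (pvPopIf tile1 [p0+1, p1+1]) [p0+1, p1-1]) [p0-1, p1+1]) [p0-1, p1-1]
  else tile1

def solution (room : List Int) (molds : List (List Int)) : String :=
  -- tile = [[e+1,n+1] for e in range(room[0]) for n in range(room[1])]; room[0]/room[1] exact under Pre_solution
  let tile0 := (PySem.List.pyRange 0 ((PySem.List.pyGet? room 0).getD 0) 1).flatMap (fun e =>
    (PySem.List.pyRange 0 ((PySem.List.pyGet? room 1).getD 0) 1).map (fun n => [e+1, n+1]))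
  let tile := (PySem.List.enumerate molds 0).foldl (pvStepA molds) tile0
  if tile.length = 0 then "yes" else "no"

-- ===== PORT B =====
-- Python's 'tuple(m)' set keys are modelled as the list m itself (identical equality on Int sequences)
def pvDiagsB (m : List Int) : List (List Int) :=
  let x := (PySem.List.pyGet? m 0).getD 0
  let y := (PySem.List.pyGet? m 1).getD 0
  [[x+1, y+1], [x+1, y-1], [x-1, y+1], [x-1, y-1]]

def solution_alt (room : List Int) (molds : List (List Int)) : String :=
  let covered : PySem.Set (List Int) := PySem.Set.ofList molds
  let covered := (PySem.List.slice molds none (some (-1))).foldl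
    (fun s m => PySem.Set.update s (pvDiagsB m)) covered
  let cells : PySem.Set (List Int) := PySem.Set.ofList
    ((PySem.List.pyRange 0 ((PySem.List.pyGet? room 0).getD 0) 1).flatMap (fun e =>
      (PySem.List.pyRange 0 ((PySem.List.pyGet? room 1).getD 0) 1).map (fun n => [e+1, n+1])))
  if PySem.Set.issubset cells covered then "yes" else "no"

-- ===== PRECONDITION & SPEC =====
-- Pre_ excludes exactly the inputs on which the Python A raises IndexError: an empty room list,
-- a room list of length 1 whose only entry is positive (room[1] is then evaluated), and a
-- non-last mold shorter than 2 entries (molds[i-1][0] / molds[i-1][1] is then evaluated).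
def Pre_solution (room : List Int) (molds : List (List Int)) : Prop :=
  1 ≤ room.length ∧ (room.headD 0 ≤ 0 ∨ 2 ≤ room.length) ∧ ∀ m ∈ molds.dropLast, 2 ≤ m.length
instance (room : List Int) (molds : List (List Int)) : Decidable (Pre_solution room molds) := by unfold Pre_solution; infer_instance
def pvWitness_solution : List Int × List (List Int) := ([2, 2], [[1, 1], [2, 2]])

def Spec_solution (room : List Int) (molds : List (List Int)) (out : String) : Prop := out = solution_alt room molds
instance (room : List Int) (molds : List (List Int)) (out : String) : Decidable (Spec_solution room molds out) := by unfold Spec_solution; infer_instance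

-- ===== CLAIM (what is proved, stated in full; the proofs are below) =====
def Claim_equal_solution : Prop := ∀ (room : List Int) (molds : List (List Int)), Dom_solution room molds → Pre_solution room molds → Spec_solution room molds (solution room molds)

-- ===== LEMMAS AND PROOFS =====

-- the list of candidates A erases while handling one enumerate(molds) entry
def pvCandsOf (molds : List (List Int)) (p : Int × List Int) : List (List Int) :=
  p.2 :: (if p.1 ≠ 0 then pvDiagsB ((PySem.List.pyGet? molds (p.1 - 1)).getD []) else [])

lemma pvPopIf_eq_erase (tile : List (List Int)) (c : List Int) :
    pvPopIf tile c = tile.erase c := by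
  unfold pvPopIf
  by_cases h : c ∈ tile
  · rw [if_pos h]
    have hs : (PySem.List.index? tile c).isSome := (PySem.List.index?_isSome_iff tile c).mpr h
    obtain ⟨j, hj⟩ := Option.isSome_iff_exists.mp hs
    obtain ⟨pre, suf, rfl, rfl, hpre⟩ := (PySem.List.index?_eq_some_iff _ _ _).mp hj
    rw [hj]
    dsimp only
    rw [PySem.List.pop?_natCast _ _ (by simp)]
    rw [List.erase_append_right _ hpre]
    simp [List.eraseIdx_append_of_length_le (le_refl pre.length)]
  · rw [if_neg h, List.erase_of_not_mem h]

lemma pvStepA_eq (molds : List (List Int)) (tile : List (List Int)) (p : Int × List Int) :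
    pvStepA molds tile p = (pvCandsOf molds p).foldl List.erase tile := by
  unfold pvStepA pvCandsOf
  by_cases h : p.1 ≠ 0 <;> simp [h, pvPopIf_eq_erase, pvDiagsB]

lemma foldl_erase_filter : ∀ (cs : List (List Int)) (tile : List (List Int)), tile.Nodup →
    cs.foldl List.erase tile = tile.filter (fun x => decide (x ∉ cs))
  | [], tile, _ => by simp
  | c :: cs, tile, h => by
      simp only [List.foldl_cons]
      rw [foldl_erase_filter cs _ (h.erase c), List.Nodup.erase_eq_filter h, List.filter_filter]
      apply List.filter_congr
      intro x _
      simp only [List.mem_cons, not_or, decide_not]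
      cases Decidable.em (x = c) <;> cases Decidable.em (x ∈ cs) <;> simp_all

lemma nodup_tile0 (a b : Int) :
    ((PySem.List.pyRange 0 a 1).flatMap (fun e =>
      (PySem.List.pyRange 0 b 1).map (fun n => [e+1, n+1]))).Nodup := by
  have hprod : ((PySem.List.pyRange 0 a 1).flatMap (fun e =>
      (PySem.List.pyRange 0 b 1).map (fun n => [e+1, n+1])))
      = ((PySem.List.pyRange 0 a 1).product (PySem.List.pyRange 0 b 1)).map
          (fun p => [p.1 + 1, p.2 + 1]) := by
    simp [List.product, List.map_flatMap, List.map_map, Function.comp_def]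
  rw [hprod]
  apply List.Nodup.map
  · intro p q hpq
    simp at hpq
    exact Prod.ext (by omega) (by omega)
  · exact List.Nodup.product (PySem.List.nodup_pyRange_one _ _) (PySem.List.nodup_pyRange_one _ _)

lemma mem_foldl_update (l : List (List Int)) :
    ∀ (s : PySem.Set (List Int)) (y : List Int),
      (y ∈ l.foldl (fun s m => PySem.Set.update s (pvDiagsB m)) s) ↔
      (y ∈ s ∨ ∃ m ∈ l, y ∈ pvDiagsB m)
  | s, y => by
    induction l generalizing s with
    | nil => simp
    | cons m l ih =>
        simp only [List.foldl_cons, ih, PySem.Set.mem_update, List.mem_cons]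
        constructor
        · rintro (⟨h | h⟩ | ⟨m', hm', h⟩)
          · exact Or.inl h
          · exact Or.inr ⟨m, Or.inl rfl, h⟩
          · exact Or.inr ⟨m', Or.inr hm', h⟩
        · rintro (h | ⟨m', (rfl | hm'), h⟩)
          · exact Or.inl (Or.inl h)
          · exact Or.inl (Or.inr h)
          · exact Or.inr ⟨m', hm', h⟩

lemma mem_candsA (molds : List (List Int)) (x : List Int) :
    (x ∈ (PySem.List.enumerate molds 0).flatMap (pvCandsOf molds)) ↔
    (x ∈ molds ∨ ∃ m ∈ molds.dropLast, x ∈ pvDiagsB m) := by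
  simp only [List.mem_flatMap, PySem.List.mem_enumerate_iff]
  constructor
  · rintro ⟨p, ⟨k, hk, rfl⟩, hx⟩
    unfold pvCandsOf at hx
    simp only [zero_add, List.mem_cons] at hx
    rcases hx with rfl | hx
    · exact Or.inl (List.getElem_mem hk)
    · by_cases hk0 : (k : Int) ≠ 0
      · rw [if_pos hk0] at hx
        have hk1 : 1 ≤ k := by omega
        have hcast : (k : Int) - 1 = ((k - 1 : Nat) : Int) := by omega
        rw [hcast, PySem.List.pyGet?_natCast] at hx
        rw [List.getElem?_eq_getElem (by omega)] at hx
        refine Or.inr ⟨molds[k-1], ?_, by simpa using hx⟩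
        rw [List.mem_iff_getElem]
        exact ⟨k - 1, by simp [List.length_dropLast]; omega, by rw [List.getElem_dropLast]⟩
      · rw [if_neg hk0] at hx
        simp at hx
  · rintro (hx | ⟨m, hm, hx⟩)
    · obtain ⟨k, hk, rfl⟩ := List.mem_iff_getElem.mp hx
      exact ⟨(0 + (k : Int), molds[k]), ⟨k, hk, rfl⟩, by simp [pvCandsOf]⟩
    · obtain ⟨j, hj, rfl⟩ := List.mem_iff_getElem.mp hm
      have hjl : j + 1 < molds.length := by
        have := List.length_dropLast (xs := molds); omega
      refine ⟨(0 + ((j+1 : Nat) : Int), molds[j+1]), ⟨j+1, hjl, rfl⟩, ?_⟩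
      unfold pvCandsOf
      have hne : (0 + ((j+1 : Nat) : Int)) ≠ 0 := by push_cast; omega
      rw [List.mem_cons, if_pos hne]
      have hcast : (0 + ((j+1 : Nat) : Int)) - 1 = ((j : Nat) : Int) := by push_cast; omega
      rw [hcast, PySem.List.pyGet?_natCast, List.getElem?_eq_getElem (by omega)]
      exact Or.inr (by simpa [List.getElem_dropLast] using hx)

lemma solution_eq_alt (room : List Int) (molds : List (List Int)) :
    solution room molds = solution_alt room molds := by
  unfold solution solution_alt
  rw [PySem.List.slice_to_neg_one]
  dsimp only
  have hstep : pvStepA molds = fun t p => (pvCandsOf molds p).foldl List.erase t := by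
    funext t p; exact pvStepA_eq molds t p
  rw [hstep, ← List.foldl_flatMap,
      foldl_erase_filter _ _ (nodup_tile0 _ _)]
  refine if_congr ?_ rfl rfl
  rw [List.length_eq_zero_iff, List.filter_eq_nil_iff, PySem.Set.issubset_iff]
  constructor
  · intro h x hx
    have := h x ((PySem.Set.mem_ofList _ _).mp hx)
    rw [mem_foldl_update, PySem.Set.mem_ofList]
    rw [← mem_candsA molds x]
    simpa using this
  · intro h x hx
    have := h x ((PySem.Set.mem_ofList _ _).mpr hx)
    rw [mem_foldl_update, PySem.Set.mem_ofList, ← mem_candsA molds x] at this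
    simpa using this

-- ===== VERDICT (by name: the statement is the Claim_ definition above) =====
theorem solution_spec : Claim_equal_solution := by
  intro room molds _ _
  exact solution_eq_alt room molds
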